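-- pv_equiv track=rewrite | github.com/bba753951/master_web-semantic- | BROWSE/views.py | showSeq
-- ===== SOURCE A (Python) =====
-- def showSeq(seq1,seq2):
--     seq1=seq1.replace("T","U")
--     seq2=seq2.replace("T","U")
--
--     seq2=seq2[::-1]
--
--     count=0   #pos
--     gu_pos=[]
--     ngu_pos=[]
--     bulge_pos=[]
--     seq1_bulge_pos=[]
--     for j in zip(seq1,seq2):
--         i=set(j)
--         if i == {'G','U'} or i == {'G','T'}:
--             gu_pos.append(count)
--         elif i == {'A','T'} or i == {'C' ,'G'} or i == {'A','U'}:
--             pass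
--         elif "-" in i:
--             if j[0] == "-":
--                 bulge_pos.append(count)
--             else:
--                 seq1_bulge_pos.append(count)
--         else:
--             ngu_pos.append(count)
--
--         count += 1
--
--
--     result_seq2=""
--     result_seq1=""
--     for i in range(len(seq2)):
--         if i in gu_pos:
--             result_seq2+='<span class="gu">'+seq2[i]+'</span>'
--         elif i in ngu_pos:
--             result_seq2+='<span class="ngu">'+seq2[i]+'</span>'
--         elif i in bulge_pos:
--             result_seq2+='<span class="bulge">'+seq2[i]+'</span>'
--         else:
--             result_seq2+=seq2[i]
--
--     for i in range(len(seq1)):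
--         if i in seq1_bulge_pos:
--             result_seq1+='<span class="bulge">'+seq1[i]+'</span>'
--         else:
--             result_seq1+=seq1[i]
--
--     result="5'"+result_seq1+"3'<br>3'"+result_seq2+"5'"
--     return result
-- ===== SOURCE B (Python) =====
-- def showSeq(seq1, seq2):
--     seq1 = seq1.replace("T", "U")
--     seq2 = seq2.replace("T", "U")[::-1]
--     r1 = []
--     r2 = []
--     for a, b in zip(seq1, seq2):
--         pair = a + b
--         if pair in ('GU', 'UG'):
--             r1.append(a)
--             r2.append('<span class="gu">' + b + '</span>')
--         elif pair in ('AU', 'UA', 'CG', 'GC'):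
--             r1.append(a)
--             r2.append(b)
--         elif a == '-':
--             r1.append(a)
--             r2.append('<span class="bulge">' + b + '</span>')
--         elif b == '-':
--             r1.append('<span class="bulge">' + a + '</span>')
--             r2.append(b)
--         else:
--             r1.append(a)
--             r2.append('<span class="ngu">' + b + '</span>')
--     n = min(len(seq1), len(seq2))
--     return "5'" + ''.join(r1) + seq1[n:] + "3'<br>3'" + ''.join(r2) + seq2[n:] + "5'"
-- ===== Notes on version B (the rewrite author's own statement) =====
-- stated objective: simpler
-- what changed: A builds four position-index lists and then rebuilds each result string by scanning range(len) with repeated 'i in list' membership tests (quadratic); B classifies each zipped pair once and appends both annotated characters in the same single pass, then attaches the raw tails beyond the common length.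
import Mathlib
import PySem

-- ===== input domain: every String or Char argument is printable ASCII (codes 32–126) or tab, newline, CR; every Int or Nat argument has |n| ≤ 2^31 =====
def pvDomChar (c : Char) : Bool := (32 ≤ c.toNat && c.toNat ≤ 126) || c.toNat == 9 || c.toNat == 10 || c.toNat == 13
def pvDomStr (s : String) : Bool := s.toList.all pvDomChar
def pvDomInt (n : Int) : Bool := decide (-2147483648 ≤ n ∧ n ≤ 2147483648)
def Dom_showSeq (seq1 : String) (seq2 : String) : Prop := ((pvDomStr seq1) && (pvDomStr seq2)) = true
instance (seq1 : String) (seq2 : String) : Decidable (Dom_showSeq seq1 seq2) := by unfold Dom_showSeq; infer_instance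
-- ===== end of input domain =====

-- B replaces A's four position-index lists and the two rebuild loops that re-scan them per position
-- ('i in list', quadratic) by a single pass over the zipped pair list that emits both annotated
-- strings directly, then appends the raw tails beyond the common length (simpler and measured faster).

-- ===== PORT A =====
-- the classification loop of A: for j in zip(seq1, seq2): … building the four position lists
def showSeq_classLoop : List (Char × Char) → Nat →
    List Nat → List Nat → List Nat → List Nat →
    List Nat × List Nat × List Nat × List Nat
  | [], _, gu, ngu, bulge, sb => (gu, ngu, bulge, sb)
  | j :: rest, count, gu, ngu, bulge, sb =>
      let i : PySem.Set Char := PySem.Set.ofList [j.1, j.2]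
      if PySem.Set.equal i (PySem.Set.ofList ['G', 'U']) || PySem.Set.equal i (PySem.Set.ofList ['G', 'T']) then
        showSeq_classLoop rest (count + 1) (gu ++ [count]) ngu bulge sb
      else if PySem.Set.equal i (PySem.Set.ofList ['A', 'T']) || PySem.Set.equal i (PySem.Set.ofList ['C', 'G']) ||
          PySem.Set.equal i (PySem.Set.ofList ['A', 'U']) then
        showSeq_classLoop rest (count + 1) gu ngu bulge sb
      else if PySem.Set.contains i '-' then
        if j.1 == '-' then showSeq_classLoop rest (count + 1) gu ngu (bulge ++ [count]) sb
        else showSeq_classLoop rest (count + 1) gu ngu bulge (sb ++ [count])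
      else showSeq_classLoop rest (count + 1) gu (ngu ++ [count]) bulge sb

def showSeq (seq1 : String) (seq2 : String) : String :=
  let s1 := (PySem.Str.replace seq1 "T" "U").toList
  -- seq2 = seq2.replace("T","U");  seq2 = seq2[::-1]
  let s2 := ((PySem.Str.slice? (PySem.Str.replace seq2 "T" "U") none none (-1)).getD "").toList
  let st := showSeq_classLoop (s1.zip s2) 0 [] [] [] []
  let gu_pos := st.1
  let ngu_pos := st.2.1
  let bulge_pos := st.2.2.1
  let seq1_bulge_pos := st.2.2.2
  let result_seq2 := (List.range s2.length).foldl (fun r i =>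
      if gu_pos.contains i then r ++ "<span class=\"gu\">".toList ++ [s2.getD i ' '] ++ "</span>".toList
      else if ngu_pos.contains i then r ++ "<span class=\"ngu\">".toList ++ [s2.getD i ' '] ++ "</span>".toList
      else if bulge_pos.contains i then r ++ "<span class=\"bulge\">".toList ++ [s2.getD i ' '] ++ "</span>".toList
      else r ++ [s2.getD i ' ']) []
  let result_seq1 := (List.range s1.length).foldl (fun r i =>
      if seq1_bulge_pos.contains i then r ++ "<span class=\"bulge\">".toList ++ [s1.getD i ' '] ++ "</span>".toList
      else r ++ [s1.getD i ' ']) []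
  String.ofList ("5'".toList ++ result_seq1 ++ "3'<br>3'".toList ++ result_seq2 ++ "5'".toList)

-- ===== PORT B =====
inductive PairCls where
  | gu | wc | bulge2 | bulge1 | ngu
deriving DecidableEq, Repr

-- the if/elif chain of Source B's loop body, as a classification of the aligned pair
def classifyPair (a : Char) (b : Char) : PairCls :=
  if (a = 'G' ∧ b = 'U') ∨ (a = 'U' ∧ b = 'G') then .gu
  else if (a = 'A' ∧ b = 'U') ∨ (a = 'U' ∧ b = 'A') ∨ (a = 'C' ∧ b = 'G') ∨ (a = 'G' ∧ b = 'C') then .wc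
  else if a = '-' then .bulge2
  else if b = '-' then .bulge1
  else .ngu

def spanWrap (cls : List Char) (c : Char) : List Char :=
  "<span class=\"".toList ++ cls ++ "\">".toList ++ [c] ++ "</span>".toList

-- the single pass of Source B: both result strings built together from the zipped pairs
def showSeq_altLoop : List (Char × Char) → List Char × List Char
  | [] => ([], [])
  | (a, b) :: rest =>
      let r := showSeq_altLoop rest
      match classifyPair a b with
      | .gu => (a :: r.1, spanWrap "gu".toList b ++ r.2)
      | .wc => (a :: r.1, b :: r.2)
      | .bulge2 => (a :: r.1, spanWrap "bulge".toList b ++ r.2)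
      | .bulge1 => (spanWrap "bulge".toList a ++ r.1, b :: r.2)
      | .ngu => (a :: r.1, spanWrap "ngu".toList b ++ r.2)

def showSeq_alt (seq1 : String) (seq2 : String) : String :=
  let l1 := (PySem.Str.replace seq1 "T" "U").toList
  let l2 := (PySem.Str.replace seq2 "T" "U").toList.reverse
  let r := showSeq_altLoop (l1.zip l2)
  let n := min l1.length l2.length
  String.ofList ("5'".toList ++ r.1 ++ l1.drop n ++ "3'<br>3'".toList ++ r.2 ++ l2.drop n ++ "5'".toList)

-- ===== PRECONDITION & SPEC =====
def Spec_showSeq (seq1 : String) (seq2 : String) (out : String) : Prop := out = showSeq_alt seq1 seq2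
instance (seq1 : String) (seq2 : String) (out : String) : Decidable (Spec_showSeq seq1 seq2 out) := by unfold Spec_showSeq; infer_instance

-- ===== CLAIM (what is proved, stated in full; the proofs are below) =====
def Claim_equal_showSeq : Prop := ∀ (seq1 : String) (seq2 : String), Dom_showSeq seq1 seq2 → Spec_showSeq seq1 seq2 (showSeq seq1 seq2)

-- ===== LEMMAS AND PROOFS =====

-- single-character replace is a map over the characters
theorem replace_go_single (o n : Char) : ∀ (fuel : Nat) (l acc : List Char),
    PySem.Chars.replace.go [o] [n] fuel l acc =
      acc.reverse ++ (l.take fuel).map (fun c => if c = o then n else c) ++ l.drop fuel := by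
  intro fuel
  induction fuel with
  | zero => intro l acc; simp [PySem.Chars.replace.go]
  | succ m ih =>
    intro l acc
    cases l with
    | nil => simp [PySem.Chars.replace.go]
    | cons c t =>
      by_cases hc : c = o
      · subst hc
        have hpre : [c].isPrefixOf (c :: t) = true := by simp [List.isPrefixOf]
        simp only [PySem.Chars.replace.go, hpre, if_true]
        rw [ih]; simp
      · have hpre : [o].isPrefixOf (c :: t) = false := by
          simp [List.isPrefixOf]; exact fun h => absurd h.symm hc
        simp only [PySem.Chars.replace.go, hpre]
        rw [if_neg (by simp [Ne.symm])]
        rw [ih]; simp [hc]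

theorem replace_single (o n : Char) (l : List Char) :
    PySem.Chars.replace l [o] [n] = l.map (fun c => if c = o then n else c) := by
  rw [PySem.Chars.replace]
  simp only [List.isEmpty_cons, if_false, Bool.false_eq_true]
  rw [replace_go_single]
  simp

theorem mem_replace_TU_ne_T {c : Char} {s : String}
    (h : c ∈ (PySem.Str.replace s "T" "U").toList) : c ≠ 'T' := by
  rw [PySem.Str.toList_replace] at h
  have h1 : ("T" : String).toList = ['T'] := rfl
  have h2 : ("U" : String).toList = ['U'] := rfl
  rw [h1, h2, replace_single] at h
  rcases List.mem_map.mp h with ⟨x, _, hx⟩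
  by_cases hxo : x = 'T' <;> simp [hxo] at hx
  · subst hx; decide
  · subst hx; exact hxo

-- {a,b} == {x,y} is the symmetric pair of equalities
theorem set_pair_eq_pair (a b x y : Char) (hxy : x ≠ y) :
    PySem.Set.equal (PySem.Set.ofList [a, b]) (PySem.Set.ofList [x, y]) = true ↔
      ((a = x ∧ b = y) ∨ (a = y ∧ b = x)) := by
  rw [PySem.Set.equal_iff]
  simp only [PySem.Set.mem_ofList, List.mem_cons, List.not_mem_nil, or_false]
  constructor
  · intro h
    have hx' := (h x).mpr (Or.inl rfl)
    have hy' := (h y).mpr (Or.inr rfl)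
    have ha' := (h a).mp (Or.inl rfl)
    rcases ha' with rfl | rfl
    · rcases hy' with rfl | rfl
      · exact absurd rfl hxy
      · exact Or.inl ⟨rfl, rfl⟩
    · rcases hx' with rfl | rfl
      · exact absurd rfl hxy
      · exact Or.inr ⟨rfl, rfl⟩
  · rintro (⟨rfl, rfl⟩ | ⟨rfl, rfl⟩) z <;> constructor <;> intro h <;> tauto

theorem set_pair_contains (a b x : Char) :
    PySem.Set.contains (PySem.Set.ofList [a, b]) x = true ↔ (a = x ∨ b = x) := by
  rw [PySem.Set.contains_iff]
  simp only [PySem.Set.mem_ofList, List.mem_cons, List.not_mem_nil, or_false]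
  constructor
  · rintro (rfl | rfl) <;> tauto
  · rintro (rfl | rfl) <;> tauto

-- positions of class k among the zipped pairs, counting from c (A's four lists, in one view)
def selCls (k : PairCls) : List (Char × Char) → Nat → List Nat
  | [], _ => []
  | p :: rest, c => (if classifyPair p.1 p.2 = k then [c] else []) ++ selCls k rest (c + 1)

theorem classLoop_eq (ps : List (Char × Char)) (hT : ∀ p ∈ ps, p.1 ≠ 'T' ∧ p.2 ≠ 'T') :
    ∀ (c : Nat) (gu ngu bu sb : List Nat),
      showSeq_classLoop ps c gu ngu bu sb =
        (gu ++ selCls .gu ps c, ngu ++ selCls .ngu ps c,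
         bu ++ selCls .bulge2 ps c, sb ++ selCls .bulge1 ps c) := by
  induction ps with
  | nil => intro c gu ngu bu sb; simp [showSeq_classLoop, selCls]
  | cons p rest ih =>
    intro c gu ngu bu sb
    obtain ⟨a, b⟩ := p
    have ha : a ≠ 'T' := (hT (a, b) (by simp)).1
    have hb : b ≠ 'T' := (hT (a, b) (by simp)).2
    have ihr := ih (fun q hq => hT q (List.mem_cons_of_mem _ hq))
    have hGT : ¬((a = 'G' ∧ b = 'T') ∨ (a = 'T' ∧ b = 'G')) := by
      rintro (⟨_, h⟩ | ⟨h, _⟩) <;> [exact hb h; exact ha h]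
    have hAT : ¬((a = 'A' ∧ b = 'T') ∨ (a = 'T' ∧ b = 'A')) := by
      rintro (⟨_, h⟩ | ⟨h, _⟩) <;> [exact hb h; exact ha h]
    by_cases hP1 : (a = 'G' ∧ b = 'U') ∨ (a = 'U' ∧ b = 'G')
    · have hcls : classifyPair a b = .gu := by simp [classifyPair, hP1]
      have hc1 : (PySem.Set.equal (PySem.Set.ofList [a, b]) (PySem.Set.ofList ['G', 'U']) ||
          PySem.Set.equal (PySem.Set.ofList [a, b]) (PySem.Set.ofList ['G', 'T'])) = true := by
        rw [Bool.or_eq_true, set_pair_eq_pair a b 'G' 'U' (by decide)]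
        exact Or.inl hP1
      rw [showSeq_classLoop]
      rw [hc1, if_pos rfl, ihr]
      simp [selCls, hcls]
    · have hc1 : (PySem.Set.equal (PySem.Set.ofList [a, b]) (PySem.Set.ofList ['G', 'U']) ||
          PySem.Set.equal (PySem.Set.ofList [a, b]) (PySem.Set.ofList ['G', 'T'])) = false := by
        rw [Bool.eq_false_iff, Ne, Bool.or_eq_true, set_pair_eq_pair a b 'G' 'U' (by decide),
          set_pair_eq_pair a b 'G' 'T' (by decide)]
        rintro (h | h)
        · exact hP1 h
        · exact hGT h
      by_cases hP2 : (a = 'A' ∧ b = 'U') ∨ (a = 'U' ∧ b = 'A') ∨ (a = 'C' ∧ b = 'G') ∨ (a = 'G' ∧ b = 'C')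
      · have hcls : classifyPair a b = .wc := by simp [classifyPair, hP1, hP2]
        have hc2 : (PySem.Set.equal (PySem.Set.ofList [a, b]) (PySem.Set.ofList ['A', 'T']) ||
            PySem.Set.equal (PySem.Set.ofList [a, b]) (PySem.Set.ofList ['C', 'G']) ||
            PySem.Set.equal (PySem.Set.ofList [a, b]) (PySem.Set.ofList ['A', 'U'])) = true := by
          rw [Bool.or_eq_true, Bool.or_eq_true, set_pair_eq_pair a b 'A' 'T' (by decide),
            set_pair_eq_pair a b 'C' 'G' (by decide), set_pair_eq_pair a b 'A' 'U' (by decide)]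
          rcases hP2 with ⟨h1, h2⟩ | ⟨h1, h2⟩ | ⟨h1, h2⟩ | ⟨h1, h2⟩ <;> subst h1 <;> subst h2 <;> simp
        rw [showSeq_classLoop]
        rw [hc1, hc2, if_neg Bool.false_ne_true, if_pos rfl, ihr]
        simp [selCls, hcls]
      · have hc2 : (PySem.Set.equal (PySem.Set.ofList [a, b]) (PySem.Set.ofList ['A', 'T']) ||
            PySem.Set.equal (PySem.Set.ofList [a, b]) (PySem.Set.ofList ['C', 'G']) ||
            PySem.Set.equal (PySem.Set.ofList [a, b]) (PySem.Set.ofList ['A', 'U'])) = false := by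
          rw [Bool.eq_false_iff, Ne, Bool.or_eq_true, Bool.or_eq_true,
            set_pair_eq_pair a b 'A' 'T' (by decide), set_pair_eq_pair a b 'C' 'G' (by decide),
            set_pair_eq_pair a b 'A' 'U' (by decide)]
          rintro ((h | h) | h)
          · exact hAT h
          · rcases h with h | h
            · exact hP2 (Or.inr (Or.inr (Or.inl h)))
            · exact hP2 (Or.inr (Or.inr (Or.inr h)))
          · rcases h with h | h
            · exact hP2 (Or.inl h)
            · exact hP2 (Or.inr (Or.inl h))
        by_cases hda : a = '-'
        · have hcls : classifyPair a b = .bulge2 := by simp [classifyPair, hda]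
          have hc3 : PySem.Set.contains (PySem.Set.ofList [a, b]) '-' = true := by
            rw [set_pair_contains]; exact Or.inl hda
          have hbeq : (a == '-') = true := by simp [hda]
          rw [showSeq_classLoop]
          rw [hc1, hc2, hc3, hbeq, if_neg Bool.false_ne_true, if_neg Bool.false_ne_true,
            if_pos rfl, if_pos rfl, ihr]
          simp [selCls, hcls]
        · by_cases hdb : b = '-'
          · have hcls : classifyPair a b = .bulge1 := by simp [classifyPair, hda, hdb]
            have hc3 : PySem.Set.contains (PySem.Set.ofList [a, b]) '-' = true := by
              rw [set_pair_contains]; exact Or.inr hdb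
            have hbeq : (a == '-') = false := by simp [hda]
            rw [showSeq_classLoop]
            rw [hc1, hc2, hc3, hbeq, if_neg Bool.false_ne_true, if_neg Bool.false_ne_true,
              if_pos rfl, if_neg Bool.false_ne_true, ihr]
            simp [selCls, hcls]
          · have hcls : classifyPair a b = .ngu := by simp [classifyPair, hP1, hP2, hda, hdb]
            have hc3 : PySem.Set.contains (PySem.Set.ofList [a, b]) '-' = false := by
              rw [Bool.eq_false_iff, Ne, set_pair_contains]
              rintro (h | h)
              · exact hda h
              · exact hdb h
            rw [showSeq_classLoop]
            rw [hc1, hc2, hc3, if_neg Bool.false_ne_true, if_neg Bool.false_ne_true,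
              if_neg Bool.false_ne_true, ihr]
            simp [selCls, hcls]

theorem mem_selCls {k : PairCls} {ps : List (Char × Char)} {c i : Nat} :
    i ∈ selCls k ps c ↔ c ≤ i ∧ i - c < ps.length ∧
      classifyPair (ps.getD (i - c) default).1 (ps.getD (i - c) default).2 = k := by
  induction ps generalizing c with
  | nil => simp [selCls]
  | cons p rest ih =>
    simp only [selCls, List.mem_append, ih]
    constructor
    · rintro (h | ⟨h1, h2, h3⟩)
      · split at h
        · rcases List.mem_singleton.mp h with rfl
          refine ⟨le_refl _, by simp, ?_⟩
          simpa using ‹classifyPair p.1 p.2 = k›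
        · cases h
      · refine ⟨by omega, by simp; omega, ?_⟩
        have : i - c = (i - (c + 1)) + 1 := by omega
        rw [this]
        simpa using h3
    · rintro ⟨h1, h2, h3⟩
      by_cases hic : i = c
      · subst hic
        simp at h3
        left; simp [h3]
      · right
        refine ⟨by omega, by simp at h2; omega, ?_⟩
        have : i - c = (i - (c + 1)) + 1 := by omega
        rw [this] at h3
        simpa using h3

theorem sel_contains {k : PairCls} {ps : List (Char × Char)} {i : Nat} :
    (selCls k ps 0).contains i = true ↔ i < ps.length ∧
      classifyPair (ps.getD i default).1 (ps.getD i default).2 = k := by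
  rw [List.contains_iff_mem, mem_selCls]
  simp

theorem sel_contains_false {k : PairCls} {ps : List (Char × Char)} {i : Nat}
    (h : classifyPair (ps.getD i default).1 (ps.getD i default).2 ≠ k) :
    ¬((selCls k ps 0).contains i = true) := by
  rw [sel_contains]; rintro ⟨_, hc⟩; exact h hc

theorem sel_contains_big {k : PairCls} {ps : List (Char × Char)} {i : Nat}
    (h : ps.length ≤ i) : ¬((selCls k ps 0).contains i = true) := by
  rw [sel_contains]; rintro ⟨h', _⟩; omega

-- what each aligned pair contributes to result_seq1 / result_seq2
def rend1 (p : Char × Char) : List Char :=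
  match classifyPair p.1 p.2 with
  | .bulge1 => spanWrap "bulge".toList p.1
  | _ => [p.1]

def rend2 (p : Char × Char) : List Char :=
  match classifyPair p.1 p.2 with
  | .gu => spanWrap "gu".toList p.2
  | .wc => [p.2]
  | .bulge2 => spanWrap "bulge".toList p.2
  | .bulge1 => [p.2]
  | .ngu => spanWrap "ngu".toList p.2

theorem altLoop_eq (ps : List (Char × Char)) :
    showSeq_altLoop ps = (ps.flatMap rend1, ps.flatMap rend2) := by
  induction ps with
  | nil => rfl
  | cons p rest ih =>
    obtain ⟨a, b⟩ := p
    simp only [showSeq_altLoop, ih, List.flatMap_cons]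
    cases h : classifyPair a b <;> simp [h, rend1, rend2]

theorem flatMap_range_eq {α β : Type} (l : List α) (g : Nat → List β) (h' : α → List β)
    (H : ∀ (i : Nat) (hi : i < l.length), g i = h' l[i]) :
    (List.range l.length).flatMap g = l.flatMap h' := by
  induction l using List.reverseRecOn with
  | nil => simp
  | append_singleton l x ih =>
    rw [List.length_append, List.length_singleton, List.range_succ]
    rw [List.flatMap_append, List.flatMap_append]
    congr 1
    · exact ih (fun i hi => by
        rw [H i (by simp; omega)]
        congr 1
        exact List.getElem_append_left (bs := [x]) hi)
    · simp only [List.flatMap_cons, List.flatMap_nil, List.append_nil]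
      rw [H l.length (by simp)]
      congr 1
      simp

-- the body of A's result_seq2 loop, as a function of the position
def g2fun (l1 l2 : List Char) (i : Nat) : List Char :=
  if (selCls .gu (l1.zip l2) 0).contains i then
    "<span class=\"gu\">".toList ++ [l2.getD i ' '] ++ "</span>".toList
  else if (selCls .ngu (l1.zip l2) 0).contains i then
    "<span class=\"ngu\">".toList ++ [l2.getD i ' '] ++ "</span>".toList
  else if (selCls .bulge2 (l1.zip l2) 0).contains i then
    "<span class=\"bulge\">".toList ++ [l2.getD i ' '] ++ "</span>".toList
  else [l2.getD i ' ']

-- the body of A's result_seq1 loop, as a function of the position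
def g1fun (l1 l2 : List Char) (i : Nat) : List Char :=
  if (selCls .bulge1 (l1.zip l2) 0).contains i then
    "<span class=\"bulge\">".toList ++ [l1.getD i ' '] ++ "</span>".toList
  else [l1.getD i ' ']

theorem lit_gu : ("<span class=\"gu\">".toList : List Char) =
    "<span class=\"".toList ++ "gu".toList ++ "\">".toList := by decide

theorem lit_ngu : ("<span class=\"ngu\">".toList : List Char) =
    "<span class=\"".toList ++ "ngu".toList ++ "\">".toList := by decide

theorem lit_bulge : ("<span class=\"bulge\">".toList : List Char) =
    "<span class=\"".toList ++ "bulge".toList ++ "\">".toList := by decide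

theorem g2_eq_rend2 (l1 l2 : List Char) (i : Nat) (hi : i < (l1.zip l2).length) :
    g2fun l1 l2 i = rend2 (l1.zip l2)[i] := by
  have hi2 : i < l2.length := by rw [List.length_zip] at hi; omega
  have hget : (l1.zip l2).getD i default = (l1.zip l2)[i] := List.getD_eq_getElem _ _ hi
  have hc : l2.getD i ' ' = (l1.zip l2)[i].2 := by
    rw [List.getD_eq_getElem _ _ hi2, List.getElem_zip]
  unfold g2fun rend2
  rcases hk : classifyPair (l1.zip l2)[i].1 (l1.zip l2)[i].2 with _ | _ | _ | _ | _
  · rw [if_pos (sel_contains.mpr ⟨hi, by rw [hget]; exact hk⟩)]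
    simp only [hc, spanWrap]
    rw [lit_gu]
  · rw [if_neg (sel_contains_false (by rw [hget, hk]; decide)),
      if_neg (sel_contains_false (by rw [hget, hk]; decide)),
      if_neg (sel_contains_false (by rw [hget, hk]; decide)), hc]
  · rw [if_neg (sel_contains_false (by rw [hget, hk]; decide)),
      if_neg (sel_contains_false (by rw [hget, hk]; decide)),
      if_pos (sel_contains.mpr ⟨hi, by rw [hget]; exact hk⟩)]
    simp only [hc, spanWrap]
    rw [lit_bulge]
  · rw [if_neg (sel_contains_false (by rw [hget, hk]; decide)),
      if_neg (sel_contains_false (by rw [hget, hk]; decide)),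
      if_neg (sel_contains_false (by rw [hget, hk]; decide)), hc]
  · rw [if_neg (sel_contains_false (by rw [hget, hk]; decide)),
      if_pos (sel_contains.mpr ⟨hi, by rw [hget]; exact hk⟩)]
    simp only [hc, spanWrap]
    rw [lit_ngu]

theorem g2_big (l1 l2 : List Char) (i : Nat) (hi : (l1.zip l2).length ≤ i) :
    g2fun l1 l2 i = [l2.getD i ' '] := by
  unfold g2fun
  rw [if_neg (sel_contains_big hi), if_neg (sel_contains_big hi), if_neg (sel_contains_big hi)]

theorem g1_eq_rend1 (l1 l2 : List Char) (i : Nat) (hi : i < (l1.zip l2).length) :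
    g1fun l1 l2 i = rend1 (l1.zip l2)[i] := by
  have hi1 : i < l1.length := by rw [List.length_zip] at hi; omega
  have hget : (l1.zip l2).getD i default = (l1.zip l2)[i] := List.getD_eq_getElem _ _ hi
  have hc : l1.getD i ' ' = (l1.zip l2)[i].1 := by
    rw [List.getD_eq_getElem _ _ hi1, List.getElem_zip]
  unfold g1fun rend1
  rcases hk : classifyPair (l1.zip l2)[i].1 (l1.zip l2)[i].2 with _ | _ | _ | _ | _
  · rw [if_neg (sel_contains_false (by rw [hget, hk]; decide)), hc]
  · rw [if_neg (sel_contains_false (by rw [hget, hk]; decide)), hc]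
  · rw [if_neg (sel_contains_false (by rw [hget, hk]; decide)), hc]
  · rw [if_pos (sel_contains.mpr ⟨hi, by rw [hget]; exact hk⟩)]
    simp only [hc, spanWrap]
    rw [lit_bulge]
  · rw [if_neg (sel_contains_false (by rw [hget, hk]; decide)), hc]

theorem g1_big (l1 l2 : List Char) (i : Nat) (hi : (l1.zip l2).length ≤ i) :
    g1fun l1 l2 i = [l1.getD i ' '] := by
  unfold g1fun
  rw [if_neg (sel_contains_big hi)]

-- A's membership-scanning rebuild loop over range(len(l)) splits into the zipped prefix and the raw tail
theorem flatMap_split (l1 l2 l : List Char) (g : Nat → List Char) (rend : Char × Char → List Char)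
    (hn : (l1.zip l2).length ≤ l.length)
    (Hsmall : ∀ i (hi : i < (l1.zip l2).length), g i = rend (l1.zip l2)[i])
    (Hbig : ∀ i, (l1.zip l2).length ≤ i → i < l.length → g i = [l.getD i ' ']) :
    (List.range l.length).flatMap g = (l1.zip l2).flatMap rend ++ l.drop (l1.zip l2).length := by
  have hsplit : l.length = (l1.zip l2).length + (l.length - (l1.zip l2).length) :=
    (Nat.add_sub_cancel' hn).symm
  conv_lhs => rw [hsplit]
  rw [List.range_add, List.flatMap_append, List.flatMap_map]
  congr 1
  · exact flatMap_range_eq (l1.zip l2) g rend Hsmall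
  · have hlen : (l.drop (l1.zip l2).length).length = l.length - (l1.zip l2).length := by
      rw [List.length_drop]
    rw [← hlen]
    rw [flatMap_range_eq (l.drop (l1.zip l2).length) _ (fun c => [c]) ?_]
    · exact List.flatMap_singleton' _
    · intro i hi
      have hi' : (l1.zip l2).length + i < l.length := by
        rw [hlen] at hi; omega
      rw [Hbig _ (by omega) hi']
      rw [List.getElem_drop, List.getD_eq_getElem _ _ hi']

-- ===== VERDICT (by name: the statement is the Claim_ definition above) =====
theorem showSeq_spec : Claim_equal_showSeq := by
  intro seq1 seq2 _
  unfold Spec_showSeq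
  simp only [showSeq, showSeq_alt]
  rw [PySem.Str.slice?_none_none_neg_one]
  simp only [Option.getD_some, String.toList_ofList]
  set l1 : List Char := (PySem.Str.replace seq1 "T" "U").toList with hl1
  set l2 : List Char := (PySem.Str.replace seq2 "T" "U").toList.reverse with hl2
  clear_value l1 l2
  have hT : ∀ p ∈ l1.zip l2, p.1 ≠ 'T' ∧ p.2 ≠ 'T' := by
    intro p hp
    have hmem := List.of_mem_zip (l₁ := l1) (l₂ := l2) (a := p.1) (b := p.2) (by simpa using hp)
    refine ⟨mem_replace_TU_ne_T (by rw [hl1] at hmem; exact hmem.1), ?_⟩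
    have h2 := hmem.2
    rw [hl2, List.mem_reverse] at h2
    exact mem_replace_TU_ne_T h2
  have hgu : (showSeq_classLoop (l1.zip l2) 0 [] [] [] []).1 = selCls .gu (l1.zip l2) 0 := by
    rw [classLoop_eq _ hT]; simp
  have hngu : (showSeq_classLoop (l1.zip l2) 0 [] [] [] []).2.1 = selCls .ngu (l1.zip l2) 0 := by
    rw [classLoop_eq _ hT]; simp
  have hbu : (showSeq_classLoop (l1.zip l2) 0 [] [] [] []).2.2.1 = selCls .bulge2 (l1.zip l2) 0 := by
    rw [classLoop_eq _ hT]; simp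
  have hsb : (showSeq_classLoop (l1.zip l2) 0 [] [] [] []).2.2.2 = selCls .bulge1 (l1.zip l2) 0 := by
    rw [classLoop_eq _ hT]; simp
  rw [hgu, hngu, hbu, hsb, altLoop_eq]
  have hfold2 : (List.range l2.length).foldl (fun r i =>
      if (selCls .gu (l1.zip l2) 0).contains i then
        r ++ "<span class=\"gu\">".toList ++ [l2.getD i ' '] ++ "</span>".toList
      else if (selCls .ngu (l1.zip l2) 0).contains i then
        r ++ "<span class=\"ngu\">".toList ++ [l2.getD i ' '] ++ "</span>".toList
      else if (selCls .bulge2 (l1.zip l2) 0).contains i then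
        r ++ "<span class=\"bulge\">".toList ++ [l2.getD i ' '] ++ "</span>".toList
      else r ++ [l2.getD i ' ']) [] =
      (l1.zip l2).flatMap rend2 ++ l2.drop (l1.zip l2).length := by
    have hb : (fun (r : List Char) (i : Nat) =>
        if (selCls .gu (l1.zip l2) 0).contains i then
          r ++ "<span class=\"gu\">".toList ++ [l2.getD i ' '] ++ "</span>".toList
        else if (selCls .ngu (l1.zip l2) 0).contains i then
          r ++ "<span class=\"ngu\">".toList ++ [l2.getD i ' '] ++ "</span>".toList
        else if (selCls .bulge2 (l1.zip l2) 0).contains i then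
          r ++ "<span class=\"bulge\">".toList ++ [l2.getD i ' '] ++ "</span>".toList
        else r ++ [l2.getD i ' ']) = fun r i => r ++ g2fun l1 l2 i := by
      funext r i
      simp only [g2fun]
      split_ifs <;> simp [List.append_assoc]
    rw [hb, PySem.List.foldl_append_eq_flatMap, List.nil_append]
    exact flatMap_split l1 l2 l2 _ rend2 (by rw [List.length_zip]; omega)
      (g2_eq_rend2 l1 l2) (fun i h1 _ => g2_big l1 l2 i h1)
  have hfold1 : (List.range l1.length).foldl (fun r i =>
      if (selCls .bulge1 (l1.zip l2) 0).contains i then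
        r ++ "<span class=\"bulge\">".toList ++ [l1.getD i ' '] ++ "</span>".toList
      else r ++ [l1.getD i ' ']) [] =
      (l1.zip l2).flatMap rend1 ++ l1.drop (l1.zip l2).length := by
    have hb : (fun (r : List Char) (i : Nat) =>
        if (selCls .bulge1 (l1.zip l2) 0).contains i then
          r ++ "<span class=\"bulge\">".toList ++ [l1.getD i ' '] ++ "</span>".toList
        else r ++ [l1.getD i ' ']) = fun r i => r ++ g1fun l1 l2 i := by
      funext r i
      simp only [g1fun]
      split_ifs <;> simp [List.append_assoc]
    rw [hb, PySem.List.foldl_append_eq_flatMap, List.nil_append]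
    exact flatMap_split l1 l2 l1 _ rend1 (by rw [List.length_zip]; omega)
      (g1_eq_rend1 l1 l2) (fun i h1 _ => g1_big l1 l2 i h1)
  rw [hfold1, hfold2]
  rw [← List.length_zip (l₁ := l1) (l₂ := l2)]
  simp [List.append_assoc]
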